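-- pv_equiv track=rewrite | github.com/edwak97/aoc_solutions_22 | day4.py | overlapped
-- ===== SOURCE A (Python) =====
-- def overlapped(args):
-- 	args = sorted(args, key = lambda x:x[0])
-- 	i = 0
-- 	while(i < len(args)-1):
-- 		if args[i][1] >= args[i+1][0]:
-- 			return 1
-- 		i+=1
-- 	return 0
-- ===== SOURCE B (Python) =====
-- def overlapped(args):
-- 	if not args:
-- 		return 0
-- 	x = args[0]
-- 	rest = args[1:]
-- 	for y in rest:
-- 		if (x[1] >= y[0]) if x[0] <= y[0] else (y[1] >= x[0]):
-- 			return 1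
-- 	return overlapped(rest)
-- ===== Notes on version B (the rewrite author's own statement) =====
-- stated objective: alternative
-- what changed: Replaced A's sort-then-adjacent-pair scan by a sort-free all-pairs check (head against every later element, then recurse on the tail) using the same asymmetric earlier-start overlap rule.
import Mathlib
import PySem

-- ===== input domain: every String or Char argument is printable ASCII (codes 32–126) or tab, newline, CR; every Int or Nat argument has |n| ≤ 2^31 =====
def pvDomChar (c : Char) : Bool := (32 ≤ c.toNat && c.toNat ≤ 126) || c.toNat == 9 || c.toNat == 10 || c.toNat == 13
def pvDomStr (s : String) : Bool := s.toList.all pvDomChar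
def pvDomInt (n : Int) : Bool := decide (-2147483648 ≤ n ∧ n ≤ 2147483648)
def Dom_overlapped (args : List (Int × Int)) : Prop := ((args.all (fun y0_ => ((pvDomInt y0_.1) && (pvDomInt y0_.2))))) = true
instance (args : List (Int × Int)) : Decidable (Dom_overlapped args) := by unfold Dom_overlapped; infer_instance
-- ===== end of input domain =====

-- B replaces A's sort-then-adjacent-scan by a sort-free all-pairs scan (head vs rest,
-- then recurse on the rest) using the same asymmetric overlap rule; objective: alternative.

-- ===== PORT A =====
-- while(i < len(args)-1): if args[i][1] >= args[i+1][0]: return 1; i+=1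
-- ported structurally: the suffix starting at i is scanned; args[i], args[i+1] are its first two elements
def overlappedLoop : List (Int × Int) → Int
  | x :: y :: t => if x.2 ≥ y.1 then 1 else overlappedLoop (y :: t)
  | _ => 0

def overlapped (args : List (Int × Int)) : Int :=
  overlappedLoop (PySem.List.sorted args (fun x => x.1))

-- ===== PORT B =====
-- (x[1] >= y[0]) if x[0] <= y[0] else (y[1] >= x[0])
def ruleB (x y : Int × Int) : Bool :=
  if x.1 ≤ y.1 then decide (x.2 ≥ y.1) else decide (y.2 ≥ x.1)

def overlapped_alt : List (Int × Int) → Int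
  | [] => 0
  | x :: rest => if rest.any (fun y => ruleB x y) then 1 else overlapped_alt rest

-- ===== PRECONDITION & SPEC =====
def Spec_overlapped (args : List (Int × Int)) (out : Int) : Prop := out = overlapped_alt args
instance (args : List (Int × Int)) (out : Int) : Decidable (Spec_overlapped args out) := by unfold Spec_overlapped; infer_instance

-- ===== CLAIM (what is proved, stated in full; the proofs are below) =====
def Claim_equal_overlapped : Prop := ∀ (args : List (Int × Int)), Dom_overlapped args → Spec_overlapped args (overlapped args)

-- ===== LEMMAS AND PROOFS =====

-- some adjacent pair of s overlaps (what A's scan detects)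
def adjB : List (Int × Int) → Bool
  | x :: y :: t => decide (y.1 ≤ x.2) || adjB (y :: t)
  | _ => false

-- some pair (earlier, later) satisfies ruleB (what B detects)
def pairB : List (Int × Int) → Bool
  | [] => false
  | x :: r => r.any (fun y => ruleB x y) || pairB r

theorem loop_eq_adj (s : List (Int × Int)) :
    overlappedLoop s = if adjB s then 1 else 0 := by
  induction s with
  | nil => simp [overlappedLoop, adjB]
  | cons x s ih =>
      cases s with
      | nil => simp [overlappedLoop, adjB]
      | cons y t =>
          rw [overlappedLoop, ih]
          by_cases hc : y.1 ≤ x.2 <;> simp [adjB, hc]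

theorem alt_eq (xs : List (Int × Int)) :
    overlapped_alt xs = if pairB xs then 1 else 0 := by
  induction xs with
  | nil => simp [overlapped_alt, pairB]
  | cons x r ih =>
      rw [overlapped_alt, ih]
      by_cases h : r.any (fun y => ruleB x y) <;> simp [pairB, h]

theorem pairB_snoc (xs : List (Int × Int)) (v : Int × Int) :
    pairB (xs ++ [v]) = (pairB xs || xs.any (fun w => ruleB w v)) := by
  induction xs with
  | nil => simp [pairB]
  | cons x r ih =>
      simp only [List.cons_append, pairB, ih, List.any_append, List.any_cons,
        List.any_nil, Bool.or_false]
      rw [Bool.eq_iff_iff]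
      simp only [Bool.or_eq_true]
      tauto

theorem adj_insertBy (x : Int × Int) (s : List (Int × Int)) :
    s.Pairwise (fun a b => a.1 ≤ b.1) →
    adjB (PySem.List.insertBy (fun a b => decide (a.1 < b.1)) x s)
      = (adjB s || s.any (fun w => ruleB w x)) := by
  induction s with
  | nil => intro _; simp [PySem.List.insertBy, adjB]
  | cons y ys ih =>
      intro hs
      have hy : ∀ w ∈ ys, y.1 ≤ w.1 := (List.pairwise_cons.mp hs).1
      have hys : ys.Pairwise (fun a b => a.1 ≤ b.1) := (List.pairwise_cons.mp hs).2
      rw [PySem.List.insertBy]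
      by_cases hxy : x.1 < y.1
      · rw [if_pos (by simpa using hxy)]
        have F1 : ruleB y x = true ↔ y.1 ≤ x.2 := by
          rw [ruleB, if_neg (by omega)]; simp
        have F2 : (∃ w ∈ ys, ruleB w x = true) → y.1 ≤ x.2 := by
          rintro ⟨w, hw, hr⟩
          have hyw := hy w hw
          rw [ruleB, if_neg (by omega)] at hr
          simp at hr; omega
        rw [Bool.eq_iff_iff]
        simp only [adjB, Bool.or_eq_true, decide_eq_true_eq, List.any_cons, List.any_eq_true]
        rw [F1]
        constructor
        · rintro (h | h)
          exacts [Or.inr (Or.inl h), Or.inl h]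
        · rintro (h | h | h)
          exacts [Or.inr h, Or.inl h, Or.inl (F2 h)]
      · have hyx : y.1 ≤ x.1 := by omega
        rw [if_neg (by simpa using hxy)]
        cases ys with
        | nil =>
            simp only [PySem.List.insertBy, adjB, ruleB, List.any_cons, List.any_nil]
            rw [if_pos hyx]
            simp
        | cons z zs =>
            have hz : ∀ w ∈ zs, z.1 ≤ w.1 := (List.pairwise_cons.mp hys).1
            have hzy : y.1 ≤ z.1 := hy z (by simp)
            have hIH := ih hys
            by_cases hxz : x.1 < z.1
            · have hins : PySem.List.insertBy (fun a b => decide (a.1 < b.1)) x (z :: zs)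
                  = x :: z :: zs := by
                rw [PySem.List.insertBy, if_pos (by simpa using hxz)]
              rw [hins]
              have G1 : ruleB y x = true ↔ x.1 ≤ y.2 := by
                rw [ruleB, if_pos hyx]; simp
              have G2 : ruleB z x = true ↔ z.1 ≤ x.2 := by
                rw [ruleB, if_neg (by omega)]; simp
              have G3 : (∃ w ∈ zs, ruleB w x = true) → z.1 ≤ x.2 := by
                rintro ⟨w, hw, hr⟩
                have hzw := hz w hw
                rw [ruleB, if_neg (by omega)] at hr
                simp at hr; omega
              have G4 : z.1 ≤ y.2 → x.1 ≤ y.2 := by omega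
              rw [Bool.eq_iff_iff]
              simp only [adjB, Bool.or_eq_true, decide_eq_true_eq, List.any_cons,
                List.any_eq_true]
              rw [G1, G2]
              constructor
              · rintro (h | h | h)
                exacts [Or.inr (Or.inl h), Or.inr (Or.inr (Or.inl h)), Or.inl (Or.inr h)]
              · rintro ((h | h) | h | h | h)
                exacts [Or.inl (G4 h), Or.inr (Or.inr h), Or.inl h,
                  Or.inr (Or.inl h), Or.inr (Or.inl (G3 h))]
            · have hzx : z.1 ≤ x.1 := by omega
              have hins : PySem.List.insertBy (fun a b => decide (a.1 < b.1)) x (z :: zs)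
                  = z :: PySem.List.insertBy (fun a b => decide (a.1 < b.1)) x zs := by
                rw [PySem.List.insertBy, if_neg (by simpa using hxz)]
              rw [hins]
              have h1 : adjB (y :: z :: PySem.List.insertBy (fun a b => decide (a.1 < b.1)) x zs)
                  = (decide (z.1 ≤ y.2)
                     || adjB (z :: PySem.List.insertBy (fun a b => decide (a.1 < b.1)) x zs)) := by
                simp [adjB]
              rw [h1, ← hins, hIH]
              have H1 : ruleB y x = true → z.1 ≤ y.2 := by
                rw [ruleB, if_pos hyx]; simp; omega
              rw [Bool.eq_iff_iff]
              simp only [adjB, Bool.or_eq_true, decide_eq_true_eq, List.any_cons,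
                List.any_eq_true]
              constructor
              · rintro (h | h | h | h)
                exacts [Or.inl (Or.inl h), Or.inl (Or.inr h),
                  Or.inr (Or.inr (Or.inl h)), Or.inr (Or.inr (Or.inr h))]
              · rintro ((h | h) | h | h | h)
                exacts [Or.inl h, Or.inr (Or.inl h), Or.inl (H1 h),
                  Or.inr (Or.inr (Or.inl h)), Or.inr (Or.inr (Or.inr h))]

theorem adj_sorted (xs : List (Int × Int)) :
    adjB (PySem.List.sorted xs (fun p => p.1)) = pairB xs := by
  induction xs using List.reverseRecOn with
  | nil => rfl
  | append_singleton xs v ih =>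
      rw [PySem.List.sorted_eq_foldl_insertBy, List.foldl_append, List.foldl_cons,
        List.foldl_nil, ← PySem.List.sorted_eq_foldl_insertBy,
        adj_insertBy v _ (PySem.List.sorted_pairwise xs (fun p => p.1)),
        ih, pairB_snoc]
      congr 1
      rw [Bool.eq_iff_iff]
      simp only [List.any_eq_true, PySem.List.mem_sorted]

-- ===== VERDICT (by name: the statement is the Claim_ definition above) =====
theorem overlapped_spec : Claim_equal_overlapped := by
  intro args _
  show overlapped args = overlapped_alt args
  rw [overlapped, loop_eq_adj, adj_sorted, alt_eq]
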